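-- pv_equiv track=rewrite | github.com/rntk/txt-map | lib/txt_splitt/splitters.py | _find_whitespace_cut_html_aware
-- ===== SOURCE A (Python) =====
-- import bisect
--
-- def _pos_inside_tag(pos: int, tag_starts: list[int], tag_ends: list[int]) -> bool:
--     """Return True if *pos* falls inside an HTML tag span."""
--     idx = bisect.bisect_right(tag_starts, pos) - 1
--     return idx >= 0 and pos < tag_ends[idx]
--
-- def _find_whitespace_cut_html_aware(
--     text: str,
--     start: int,
--     end: int,
--     tag_starts: list[int],
--     tag_ends: list[int],
-- ) -> int | None:
--     """Find nearest whitespace cut position that is not inside an HTML tag."""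
--     if start >= end:
--         return None
--
--     right = start
--     while right < end:
--         if text[right].isspace() and not _pos_inside_tag(right, tag_starts, tag_ends):
--             return right
--         right += 1
--
--     left = start - 1
--     while left >= 0:
--         if text[left].isspace() and not _pos_inside_tag(left, tag_starts, tag_ends):
--             return left + 1
--         left -= 1
--
--     return None
-- ===== SOURCE B (Python) =====
-- def _find_whitespace_cut_html_aware(
--     text: str,
--     start: int,
--     end: int,
--     tag_starts: list[int],
--     tag_ends: list[int],
-- ) -> int | None:
--     """Find nearest whitespace cut position that is not inside an HTML tag.
--
--     One monotonic scan with an incremental tag-index pointer instead of a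
--     bisect per position: `idx` always points at the last tag whose start is
--     <= the current position (requires tag_starts sorted, as bisect does).
--     """
--     if start >= end:
--         return None
--
--     n = len(tag_starts)
--     idx = -1
--     for pos in range(start, end):
--         while idx + 1 < n and tag_starts[idx + 1] <= pos:
--             idx += 1
--         if text[pos].isspace() and not (idx >= 0 and pos < tag_ends[idx]):
--             return pos
--
--     for pos in range(start - 1, -1, -1):
--         while idx >= 0 and tag_starts[idx] > pos:
--             idx -= 1
--         if text[pos].isspace() and not (idx >= 0 and pos < tag_ends[idx]):
--             return pos + 1
--
--     return None
-- ===== Notes on version B (the rewrite author's own statement) =====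
-- stated objective: alternative
-- what changed: Replaces A's per-position binary search (bisect per scanned character) with a single tag-index pointer advanced/retreated incrementally across the monotonic right and left scans.
-- outside the precondition, e.g. on _find_whitespace_cut_html_aware(' ', 0, 1, [1, 0], [3, 2]): A returns None, B returns 0; on _find_whitespace_cut_html_aware('a b', 0, 3, [0, 2], [1]): A returns 1, B returns 1
import Mathlib
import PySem

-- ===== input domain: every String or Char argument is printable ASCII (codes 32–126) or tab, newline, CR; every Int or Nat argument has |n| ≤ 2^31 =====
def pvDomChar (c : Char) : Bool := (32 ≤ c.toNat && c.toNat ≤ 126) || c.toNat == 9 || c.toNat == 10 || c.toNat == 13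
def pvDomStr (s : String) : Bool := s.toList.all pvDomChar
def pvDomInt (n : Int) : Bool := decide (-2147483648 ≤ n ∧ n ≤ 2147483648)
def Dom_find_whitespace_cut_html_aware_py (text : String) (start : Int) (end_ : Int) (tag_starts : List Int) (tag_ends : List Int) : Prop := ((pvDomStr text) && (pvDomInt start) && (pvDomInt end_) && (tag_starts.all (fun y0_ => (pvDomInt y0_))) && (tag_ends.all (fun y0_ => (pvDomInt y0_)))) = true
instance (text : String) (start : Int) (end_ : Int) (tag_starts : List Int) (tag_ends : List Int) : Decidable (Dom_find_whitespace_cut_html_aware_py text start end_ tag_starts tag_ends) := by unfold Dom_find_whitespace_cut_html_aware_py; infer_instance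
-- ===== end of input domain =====

-- B replaces A's per-position bisect with one incremental tag-index pointer carried
-- through the monotonic right and left scans (objective: alternative; same measured cost).

-- ===== PORT A =====
-- `idx >= 0 and pos < tag_ends[idx]`; `none` = IndexError on tag_ends[idx] (excluded by Pre_)
def pvPosInsideTag (pos : Int) (tag_starts tag_ends : List Int) : Option Bool :=
  let idx : Int := (PySem.List.bisectRight tag_starts pos : Int) - 1
  if 0 ≤ idx then
    match PySem.List.pyGet? tag_ends idx with
    | none => none
    | some e => some (decide (pos < e))
  else some false

-- A's first while loop; `none` is both "loop finished" and an IndexError (the latter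
-- cannot occur under Pre_, where every accessed index is valid)
def pvRightA (text : String) (end_ : Int) (tag_starts tag_ends : List Int) (right : Int) : Option Int :=
  if _h : right < end_ then
    match PySem.Str.pyGet? text right with
    | none => none
    | some c =>
      if PySem.Chars.isspace c then
        match pvPosInsideTag right tag_starts tag_ends with
        | none => none
        | some ins =>
          if ins then pvRightA text end_ tag_starts tag_ends (right + 1) else some right
      else pvRightA text end_ tag_starts tag_ends (right + 1)
  else none
termination_by (end_ - right).toNat
decreasing_by all_goals omega

-- A's second while loop (same `none` convention)
def pvLeftA (text : String) (tag_starts tag_ends : List Int) (left : Int) : Option Int :=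
  if _h : 0 ≤ left then
    match PySem.Str.pyGet? text left with
    | none => none
    | some c =>
      if PySem.Chars.isspace c then
        match pvPosInsideTag left tag_starts tag_ends with
        | none => none
        | some ins =>
          if ins then pvLeftA text tag_starts tag_ends (left - 1) else some (left + 1)
      else pvLeftA text tag_starts tag_ends (left - 1)
  else none
termination_by (left + 1).toNat
decreasing_by all_goals omega

def find_whitespace_cut_html_aware_py (text : String) (start : Int) (end_ : Int) (tag_starts : List Int) (tag_ends : List Int) : Option Int :=
  if start ≥ end_ then none
  else
    match pvRightA text end_ tag_starts tag_ends start with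
    | some r => some r
    | none => pvLeftA text tag_starts tag_ends (start - 1)

-- ===== PORT B =====
-- `while idx + 1 < n and tag_starts[idx + 1] <= pos: idx += 1`
-- (the `none` branch is unreachable in B: 0 ≤ idx + 1 < n there)
def pvAdvance (tag_starts : List Int) (pos idx : Int) : Int :=
  if _h : idx + 1 < (tag_starts.length : Int) then
    match PySem.List.pyGet? tag_starts (idx + 1) with
    | some v => if v ≤ pos then pvAdvance tag_starts pos (idx + 1) else idx
    | none => idx
  else idx
termination_by ((tag_starts.length : Int) - (idx + 1)).toNat
decreasing_by all_goals omega

-- `while idx >= 0 and tag_starts[idx] > pos: idx -= 1`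
-- (the `none` branch is unreachable in B: idx stays below len(tag_starts))
def pvRetreat (tag_starts : List Int) (pos idx : Int) : Int :=
  if _h : 0 ≤ idx then
    match PySem.List.pyGet? tag_starts idx with
    | some v => if pos < v then pvRetreat tag_starts pos (idx - 1) else idx
    | none => idx
  else idx
termination_by (idx + 1).toNat
decreasing_by all_goals omega

-- `idx >= 0 and pos < tag_ends[idx]`; `false` on an out-of-range idx stands for
-- Python's IndexError, unreachable under Pre_
def pvInsideB (pos idx : Int) (tag_ends : List Int) : Bool :=
  if 0 ≤ idx then
    match PySem.List.pyGet? tag_ends idx with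
    | some e => decide (pos < e)
    | none => false
  else false

-- B's first for loop; returns (found cut or none, final idx)
def pvRightB (text : String) (end_ : Int) (tag_starts tag_ends : List Int) (pos idx : Int) : Option Int × Int :=
  if _h : pos < end_ then
    let idx' := pvAdvance tag_starts pos idx
    match PySem.Str.pyGet? text pos with
    | none => (none, idx')
    | some c =>
      if PySem.Chars.isspace c && !(pvInsideB pos idx' tag_ends) then (some pos, idx')
      else pvRightB text end_ tag_starts tag_ends (pos + 1) idx'
  else (none, idx)
termination_by (end_ - pos).toNat
decreasing_by all_goals omega

-- B's second for loop
def pvLeftB (text : String) (tag_starts tag_ends : List Int) (pos idx : Int) : Option Int :=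
  if _h : 0 ≤ pos then
    let idx' := pvRetreat tag_starts pos idx
    match PySem.Str.pyGet? text pos with
    | none => none
    | some c =>
      if PySem.Chars.isspace c && !(pvInsideB pos idx' tag_ends) then some (pos + 1)
      else pvLeftB text tag_starts tag_ends (pos - 1) idx'
  else none
termination_by (pos + 1).toNat
decreasing_by all_goals omega

def find_whitespace_cut_html_aware_py_alt (text : String) (start : Int) (end_ : Int) (tag_starts : List Int) (tag_ends : List Int) : Option Int :=
  if start ≥ end_ then none
  else
    match pvRightB text end_ tag_starts tag_ends start (-1) with
    | (some r, _) => some r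
    | (none, idx) => pvLeftB text tag_starts tag_ends (start - 1) idx

-- ===== PRECONDITION & SPEC =====
-- Pre_ admits every trivial call (start >= end) and otherwise requires in-bounds scan
-- limits (else A can hit IndexError on text), tag_starts sorted (bisect's documented
-- precondition — on unsorted input A's bisect answer is an accident of the binary-search
-- path, not a specified value) and len(tag_starts) <= len(tag_ends) (parallel span
-- lists; a shorter tag_ends can make both implementations raise IndexError).
def Pre_find_whitespace_cut_html_aware_py (text : String) (start : Int) (end_ : Int) (tag_starts : List Int) (tag_ends : List Int) : Prop :=
  start ≥ end_ ∨
    (-(text.toList.length : Int) ≤ start ∧ end_ ≤ (text.toList.length : Int) ∧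
      tag_starts.Pairwise (· ≤ ·) ∧ tag_starts.length ≤ tag_ends.length)
instance (text : String) (start : Int) (end_ : Int) (tag_starts : List Int) (tag_ends : List Int) : Decidable (Pre_find_whitespace_cut_html_aware_py text start end_ tag_starts tag_ends) := by unfold Pre_find_whitespace_cut_html_aware_py; infer_instance

def pvWitness_find_whitespace_cut_html_aware_py : String × Int × Int × List Int × List Int :=
  ("<b>a</b> b", 3, 10, [0, 4], [3, 8])

def Spec_find_whitespace_cut_html_aware_py (text : String) (start : Int) (end_ : Int) (tag_starts : List Int) (tag_ends : List Int) (out : Option Int) : Prop := out = find_whitespace_cut_html_aware_py_alt text start end_ tag_starts tag_ends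
instance (text : String) (start : Int) (end_ : Int) (tag_starts : List Int) (tag_ends : List Int) (out : Option Int) : Decidable (Spec_find_whitespace_cut_html_aware_py text start end_ tag_starts tag_ends out) := by unfold Spec_find_whitespace_cut_html_aware_py; infer_instance

-- ===== CLAIM (what is proved, stated in full; the proofs are below) =====
def Claim_equal_find_whitespace_cut_html_aware_py : Prop := ∀ (text : String) (start : Int) (end_ : Int) (tag_starts : List Int) (tag_ends : List Int), Dom_find_whitespace_cut_html_aware_py text start end_ tag_starts tag_ends → Pre_find_whitespace_cut_html_aware_py text start end_ tag_starts tag_ends → Spec_find_whitespace_cut_html_aware_py text start end_ tag_starts tag_ends (find_whitespace_cut_html_aware_py text start end_ tag_starts tag_ends)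

-- ===== LEMMAS AND PROOFS =====

-- number of tag starts ≤ pos; B's pointer idx is always pvCnt pos - 1
def pvCnt (ts : List Int) (pos : Int) : Int := (ts.countP (fun v => decide (v ≤ pos)) : Int)

lemma pvCnt_nonneg (ts : List Int) (pos : Int) : 0 ≤ pvCnt ts pos := by
  simp [pvCnt]

lemma pvCnt_le_length (ts : List Int) (pos : Int) : pvCnt ts pos ≤ (ts.length : Int) := by
  simp [pvCnt]; exact_mod_cast List.countP_le_length

lemma pvCnt_mono (ts : List Int) {p q : Int} (h : p ≤ q) : pvCnt ts p ≤ pvCnt ts q := by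
  simp only [pvCnt, Int.ofNat_le]
  exact List.countP_mono_left (fun x _ hx => by simp_all; omega)

lemma pvCnt_ge (ts : List Int) (pos : Int) (hs : ts.Pairwise (· ≤ ·)) (i : Nat)
    (hi : i < ts.length) (hle : ts[i] ≤ pos) : (i : Int) + 1 ≤ pvCnt ts pos := by
  have hall : ∀ a ∈ ts.take (i+1), (decide (a ≤ pos)) = true := by
    intro a ha
    rw [List.mem_take_iff_getElem] at ha
    obtain ⟨j, hj, rfl⟩ := ha
    simp only [decide_eq_true_eq]
    rcases Nat.lt_or_ge j i with hji | hji
    · exact le_trans (List.pairwise_iff_getElem.mp hs j i (by omega) hi hji) hle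
    · have : j = i := by omega
      subst this; exact hle
  have h1 : (ts.take (i+1)).countP (fun v => decide (v ≤ pos)) = i + 1 := by
    rw [List.countP_eq_length.mpr hall, List.length_take]; omega
  have h2 : ts.countP (fun v => decide (v ≤ pos))
      = (ts.take (i+1)).countP (fun v => decide (v ≤ pos))
        + (ts.drop (i+1)).countP (fun v => decide (v ≤ pos)) := by
    conv_lhs => rw [← List.take_append_drop (i+1) ts]
    rw [List.countP_append]
  unfold pvCnt; omega


lemma pvCnt_lt (ts : List Int) (pos : Int) (hs : ts.Pairwise (· ≤ ·)) (i : Nat)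
    (hi : i < ts.length) (hgt : pos < ts[i]) : pvCnt ts pos ≤ (i : Int) := by
  have hnone : ∀ a ∈ ts.drop i, (decide (a ≤ pos)) = false := by
    intro a ha
    rw [List.mem_drop_iff_getElem] at ha
    obtain ⟨j, hj, rfl⟩ := ha
    simp only [decide_eq_false_iff_not, not_le]
    rcases Nat.eq_zero_or_pos j with hj0 | hj0
    · subst hj0; simpa using hgt
    · exact lt_of_lt_of_le hgt (List.pairwise_iff_getElem.mp hs i (i+j) hi (by omega) (by omega))
  have h0 : (ts.drop i).countP (fun v => decide (v ≤ pos)) = 0 := by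
    rw [List.countP_eq_zero]; intro a ha; simpa using hnone a ha
  have h1 : (ts.take i).countP (fun v => decide (v ≤ pos)) ≤ i := by
    calc _ ≤ (ts.take i).length := List.countP_le_length
      _ ≤ i := by rw [List.length_take]; omega
  have h2 : ts.countP (fun v => decide (v ≤ pos))
      = (ts.take i).countP (fun v => decide (v ≤ pos))
        + (ts.drop i).countP (fun v => decide (v ≤ pos)) := by
    conv_lhs => rw [← List.take_append_drop i ts]
    rw [List.countP_append]
  unfold pvCnt; omega


lemma pvBisect_eq_cnt (ts : List Int) (pos : Int) (hs : ts.Pairwise (· ≤ ·)) :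
    (PySem.List.bisectRight ts pos : Int) = pvCnt ts pos := by
  obtain ⟨hk1, hk2, hk3⟩ := PySem.List.bisectRight_spec ts pos hs
  have hge : (PySem.List.bisectRight ts pos : Int) ≤ pvCnt ts pos := by
    rcases Nat.eq_zero_or_pos (PySem.List.bisectRight ts pos) with h0 | h0
    · rw [h0]; have : (0:Int) ≤ pvCnt ts pos := by unfold pvCnt; positivity
      omega
    · have hlt : PySem.List.bisectRight ts pos - 1 < ts.length := by omega
      have := pvCnt_ge ts pos hs (PySem.List.bisectRight ts pos - 1) hlt
        (hk2 _ hlt (by omega))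
      omega
  have hle : pvCnt ts pos ≤ (PySem.List.bisectRight ts pos : Int) := by
    rcases Nat.lt_or_ge (PySem.List.bisectRight ts pos) ts.length with h0 | h0
    · exact pvCnt_lt ts pos hs _ h0 (hk3 _ h0 le_rfl)
    · have : pvCnt ts pos ≤ (ts.length : Int) := by
        unfold pvCnt; exact_mod_cast List.countP_le_length
      omega
  omega


lemma pvAdvance_eq (ts : List Int) (pos idx : Int) (hs : ts.Pairwise (· ≤ ·))
    (h1 : -1 ≤ idx) (h2 : idx ≤ pvCnt ts pos - 1) :
    pvAdvance ts pos idx = pvCnt ts pos - 1 := by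
  rw [pvAdvance]
  by_cases hlt : idx + 1 < (ts.length : Int)
  · rw [dif_pos hlt]
    have h0 : (0:Int) ≤ idx + 1 := by omega
    have hnat : ((idx+1).toNat : Int) = idx + 1 := Int.toNat_of_nonneg h0
    rw [PySem.List.pyGet?_eq_some_getElem ts h0 hlt]
    show (if ts[(idx + 1).toNat] ≤ pos then pvAdvance ts pos (idx + 1) else idx) = pvCnt ts pos - 1
    by_cases hv : ts[(idx+1).toNat] ≤ pos
    · rw [if_pos hv]
      have hge := pvCnt_ge ts pos hs (idx+1).toNat (by omega) hv
      rw [hnat] at hge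
      exact pvAdvance_eq ts pos (idx+1) hs (by omega) (by omega)
    · rw [if_neg hv]
      have hle := pvCnt_lt ts pos hs (idx+1).toNat (by omega) (by omega)
      rw [hnat] at hle
      omega
  · rw [dif_neg hlt]
    have := pvCnt_le_length ts pos
    omega
termination_by ((ts.length : Int) - (idx + 1)).toNat
decreasing_by omega

lemma pvRetreat_eq (ts : List Int) (pos idx : Int) (hs : ts.Pairwise (· ≤ ·))
    (h1 : pvCnt ts pos - 1 ≤ idx) (h2 : idx < (ts.length : Int)) (h3 : -1 ≤ idx) :
    pvRetreat ts pos idx = pvCnt ts pos - 1 := by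
  rw [pvRetreat]
  by_cases h0 : (0:Int) ≤ idx
  · rw [dif_pos h0]
    have hnat : (idx.toNat : Int) = idx := Int.toNat_of_nonneg h0
    rw [PySem.List.pyGet?_eq_some_getElem ts h0 h2]
    show (if pos < ts[idx.toNat] then pvRetreat ts pos (idx - 1) else idx) = pvCnt ts pos - 1
    by_cases hv : pos < ts[idx.toNat]
    · rw [if_pos hv]
      have hle := pvCnt_lt ts pos hs idx.toNat (by omega) hv
      rw [hnat] at hle
      exact pvRetreat_eq ts pos (idx - 1) hs (by omega) (by omega) (by omega)
    · rw [if_neg hv]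
      have hge := pvCnt_ge ts pos hs idx.toNat (by omega) (by omega)
      rw [hnat] at hge
      omega
  · rw [dif_neg h0]
    have := pvCnt_nonneg ts pos
    omega
termination_by (idx + 1).toNat
decreasing_by omega

lemma pvInside_eq (pos : Int) (ts te : List Int) (hs : ts.Pairwise (· ≤ ·))
    (hlen : ts.length ≤ te.length) :
    pvPosInsideTag pos ts te = some (pvInsideB pos (pvCnt ts pos - 1) te) := by
  unfold pvPosInsideTag pvInsideB
  rw [pvBisect_eq_cnt ts pos hs]
  by_cases h0 : (0:Int) ≤ pvCnt ts pos - 1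
  · have hlt : pvCnt ts pos - 1 < (te.length : Int) := by
      have := pvCnt_le_length ts pos; omega
    rw [if_pos h0, if_pos h0, PySem.List.pyGet?_eq_some_getElem te h0 hlt]
  · rw [if_neg h0, if_neg h0]

lemma pvRight_eq (text : String) (end_ : Int) (ts te : List Int)
    (hs : ts.Pairwise (· ≤ ·)) (hlen : ts.length ≤ te.length)
    (hend : end_ ≤ (text.toList.length : Int)) (pos idx : Int)
    (hpos : -(text.toList.length : Int) ≤ pos) (h1 : -1 ≤ idx) (h2 : idx ≤ pvCnt ts pos - 1) :
    pvRightA text end_ ts te pos = (pvRightB text end_ ts te pos idx).1 ∧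
      ((pvRightB text end_ ts te pos idx).1 = none →
        (pvRightB text end_ ts te pos idx).2 =
          if pos < end_ then pvCnt ts (end_ - 1) - 1 else idx) := by
  by_cases hlt : pos < end_
  · have hidx' : pvAdvance ts pos idx = pvCnt ts pos - 1 := pvAdvance_eq ts pos idx hs h1 h2
    obtain ⟨c, hc⟩ : ∃ c, PySem.Str.pyGet? text pos = some c := by
      cases h : PySem.Str.pyGet? text pos with
      | some c => exact ⟨c, rfl⟩
      | none =>
        exfalso
        have h' : PySem.List.pyGet? text.toList pos = none := by simpa using h
        have := (PySem.List.pyGet?_eq_none_iff text.toList pos).mp h'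
        simp [PySem.Raise.InRange] at this
        have hL : text.toList.length = text.length := by simp
        omega
    have hA : pvRightA text end_ ts te pos =
        (if PySem.Chars.isspace c then
          (if pvInsideB pos (pvCnt ts pos - 1) te then pvRightA text end_ ts te (pos+1)
           else some pos)
         else pvRightA text end_ ts te (pos+1)) := by
      rw [pvRightA, dif_pos hlt, hc, pvInside_eq pos ts te hs hlen]
    have hB : pvRightB text end_ ts te pos idx =
        (if PySem.Chars.isspace c && !(pvInsideB pos (pvCnt ts pos - 1) te)
         then (some pos, pvCnt ts pos - 1)
         else pvRightB text end_ ts te (pos+1) (pvCnt ts pos - 1)) := by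
      rw [pvRightB, dif_pos hlt]
      simp only [hidx', hc]
    have hIH := pvRight_eq text end_ ts te hs hlen hend (pos+1) (pvCnt ts pos - 1) (by omega)
        (by have := pvCnt_nonneg ts pos; omega)
        (by have := pvCnt_mono ts (show pos ≤ pos + 1 by omega); omega)
    have hfin : ∀ r : Option Int × Int,
        (r.2 = if pos + 1 < end_ then pvCnt ts (end_ - 1) - 1 else pvCnt ts pos - 1) →
        (r.2 = if pos < end_ then pvCnt ts (end_ - 1) - 1 else idx) := by
      intro r hr
      rw [if_pos hlt]
      by_cases hlt2 : pos + 1 < end_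
      · rw [hr, if_pos hlt2]
      · rw [hr, if_neg hlt2]
        have : pos = end_ - 1 := by omega
        rw [this]
    rw [hA, hB]
    cases hsp : PySem.Chars.isspace c
    · simp only [Bool.false_and, Bool.false_eq_true, if_false]
      exact ⟨hIH.1, fun hn => hfin _ (hIH.2 hn)⟩
    · by_cases hins : pvInsideB pos (pvCnt ts pos - 1) te
      · simp only [hins, Bool.true_and, Bool.not_true, Bool.false_eq_true, if_false, if_true]
        exact ⟨hIH.1, fun hn => hfin _ (hIH.2 hn)⟩
      · have hins' : pvInsideB pos (pvCnt ts pos - 1) te = false := Bool.eq_false_iff.mpr hins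
        simp only [hins', Bool.true_and, Bool.not_false, Bool.false_eq_true, if_false, if_true]
        refine ⟨?_, ?_⟩ <;> simp
  · rw [pvRightA, pvRightB, dif_neg hlt, dif_neg hlt]
    exact ⟨rfl, fun _ => by rw [if_neg hlt]⟩
termination_by (end_ - pos).toNat
decreasing_by omega

lemma pvLeft_eq (text : String) (ts te : List Int)
    (hs : ts.Pairwise (· ≤ ·)) (hlen : ts.length ≤ te.length) (pos idx : Int)
    (hpos : pos < (text.toList.length : Int))
    (h1 : pvCnt ts pos - 1 ≤ idx) (h2 : idx < (ts.length : Int)) (h3 : -1 ≤ idx) :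
    pvLeftA text ts te pos = pvLeftB text ts te pos idx := by
  by_cases h0 : (0:Int) ≤ pos
  · have hidx' : pvRetreat ts pos idx = pvCnt ts pos - 1 := pvRetreat_eq ts pos idx hs h1 h2 h3
    obtain ⟨c, hc⟩ : ∃ c, PySem.Str.pyGet? text pos = some c := by
      cases h : PySem.Str.pyGet? text pos with
      | some c => exact ⟨c, rfl⟩
      | none =>
        exfalso
        have h' : PySem.List.pyGet? text.toList pos = none := by simpa using h
        have := (PySem.List.pyGet?_eq_none_iff text.toList pos).mp h'
        simp [PySem.Raise.InRange] at this
        have hL : text.toList.length = text.length := by simp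
        omega
    have hA : pvLeftA text ts te pos =
        (if PySem.Chars.isspace c then
          (if pvInsideB pos (pvCnt ts pos - 1) te then pvLeftA text ts te (pos - 1)
           else some (pos + 1))
         else pvLeftA text ts te (pos - 1)) := by
      rw [pvLeftA, dif_pos h0, hc, pvInside_eq pos ts te hs hlen]
    have hB : pvLeftB text ts te pos idx =
        (if PySem.Chars.isspace c && !(pvInsideB pos (pvCnt ts pos - 1) te)
         then some (pos + 1)
         else pvLeftB text ts te (pos - 1) (pvCnt ts pos - 1)) := by
      rw [pvLeftB, dif_pos h0]
      simp only [hidx', hc]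
    have hIH := pvLeft_eq text ts te hs hlen (pos - 1) (pvCnt ts pos - 1) (by omega)
        (by have := pvCnt_mono ts (show pos - 1 ≤ pos by omega); omega)
        (by have := pvCnt_le_length ts pos; omega)
        (by have := pvCnt_nonneg ts pos; omega)
    rw [hA, hB]
    cases hsp : PySem.Chars.isspace c
    · simp only [Bool.false_and, Bool.false_eq_true, if_false]
      exact hIH
    · by_cases hins : pvInsideB pos (pvCnt ts pos - 1) te
      · simp only [hins, Bool.true_and, Bool.not_true, Bool.false_eq_true, if_false, if_true]
        exact hIH
      · have hins' : pvInsideB pos (pvCnt ts pos - 1) te = false := Bool.eq_false_iff.mpr hins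
        simp only [hins', Bool.true_and, Bool.not_false, Bool.false_eq_true, if_false, if_true]
  · rw [pvLeftA, pvLeftB, dif_neg h0, dif_neg h0]
termination_by (pos + 1).toNat
decreasing_by omega

-- ===== VERDICT (by name: the statement is the Claim_ definition above) =====
theorem find_whitespace_cut_html_aware_py_spec : Claim_equal_find_whitespace_cut_html_aware_py := by
  intro text start end_ ts te _hdom hpre
  unfold Spec_find_whitespace_cut_html_aware_py
  unfold find_whitespace_cut_html_aware_py find_whitespace_cut_html_aware_py_alt
  by_cases hge : start ≥ end_
  · simp [hge]
  · simp only [hge, if_false]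
    rcases hpre with h | ⟨hstart, hend, hs, hlen⟩
    · exact absurd h hge
    have hlt : start < end_ := by omega
    obtain ⟨hA, hIdx⟩ := pvRight_eq text end_ ts te hs hlen hend start (-1) hstart
      (by omega) (by have := pvCnt_nonneg ts start; omega)
    rcases hr : pvRightB text end_ ts te start (-1) with ⟨r1, r2⟩
    rcases r1 with _ | v
    · have hA' : pvRightA text end_ ts te start = none := by rw [hA, hr]
      have hr2 : r2 = pvCnt ts (end_ - 1) - 1 := by
        have := hIdx (by rw [hr]); rw [hr] at this; simpa [hlt] using this
      rw [hA']
      subst hr2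
      exact pvLeft_eq text ts te hs hlen (start - 1) _ (by omega)
        (by exact le_sub_right_of_add_le (by
              have := pvCnt_mono ts (show start - 1 ≤ end_ - 1 by omega); omega))
        (by have := pvCnt_le_length ts (end_ - 1); omega)
        (by have := pvCnt_nonneg ts (end_ - 1); omega)
    · have hA' : pvRightA text end_ ts te start = some v := by rw [hA, hr]
      rw [hA']
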